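-- pv_equiv track=rewrite | github.com/seahoo2022/zmeasure | zmeasure/experiments/sweep.py | partition_sequence
-- ===== SOURCE A (Python) =====
-- def partition_sequence(seq):
--     """
--     Given a sequence with None as split points, return:
--     - list of partitions (list of lists)
--     - list of (start, end) tuples from each partition
--     """
--     partitions = []
--     block = []
--     for x in seq:
--         if x is None:
--             if block:
--                 partitions.append(block)
--                 block = []
--         else:
--             block.append(x)
--     if block:
--         partitions.append(block)
--
--     start_end = [(b[0], b[-1]) for b in partitions if b]
--     return partitions, start_end
-- ===== SOURCE B (Python) =====
-- def partition_sequence(seq):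
--     """
--     Given a sequence with None as split points, return:
--     - list of partitions (list of lists)
--     - list of (start, end) tuples from each partition
--     """
--     partitions = []
--     i, n = 0, len(seq)
--     while i < n:
--         if seq[i] is None:
--             i += 1
--         else:
--             j = i
--             while j < n and seq[j] is not None:
--                 j += 1
--             partitions.append(seq[i:j])
--             i = j
--     start_end = [(b[0], b[-1]) for b in partitions]
--     return partitions, start_end
-- ===== Notes on version B (the rewrite author's own statement) =====
-- stated objective: alternative
-- what changed: Replaced the element-by-element accumulator-and-flush loop with a two-pointer scan that skips None runs and slices out each maximal non-None run whole, so no pending-block state or final flush exists and start_end needs no emptiness guard.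
import Mathlib
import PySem

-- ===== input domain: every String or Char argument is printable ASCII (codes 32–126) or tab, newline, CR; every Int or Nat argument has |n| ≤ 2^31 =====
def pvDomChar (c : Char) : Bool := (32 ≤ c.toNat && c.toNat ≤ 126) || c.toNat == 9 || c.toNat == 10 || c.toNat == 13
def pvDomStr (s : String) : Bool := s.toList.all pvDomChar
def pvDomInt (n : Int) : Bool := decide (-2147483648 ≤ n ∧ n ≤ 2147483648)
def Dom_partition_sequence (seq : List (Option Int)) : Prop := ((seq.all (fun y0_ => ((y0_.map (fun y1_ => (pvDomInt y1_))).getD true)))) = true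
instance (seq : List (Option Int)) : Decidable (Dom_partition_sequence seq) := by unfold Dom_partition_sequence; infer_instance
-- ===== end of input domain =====

-- B replaces A's accumulator-and-flush loop by a two-pointer scan extracting each
-- maximal non-None run whole (alternative decomposition, same O(n) cost).

-- ===== PORT A =====
-- the for-loop over seq with state (partitions, block)
def pvALoop : List (Option Int) → List (List Int) → List Int → List (List Int) × List Int
  | [], ps, block => (ps, block)
  | none :: t, ps, block => if block ≠ [] then pvALoop t (ps ++ [block]) [] else pvALoop t ps block
  | some v :: t, ps, block => pvALoop t ps (block ++ [v])

-- the comprehension [(b[0], b[-1]) for b in partitions if b]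
def pvStartEnd (ps : List (List Int)) : List (Int × Int) :=
  ps.filterMap (fun b =>
    match b.head?, b.getLast? with
    | some h, some l => some (h, l)
    | _, _ => none)

def partition_sequence (seq : List (Option Int)) : List (List Int) × (List (Int × Int)) :=
  let st := pvALoop seq [] []
  let partitions := if st.2 ≠ [] then st.1 ++ [st.2] else st.1
  (partitions, pvStartEnd partitions)

-- ===== PORT B =====
-- the outer while loop: skip a None, or slice out the maximal non-None run
-- (seq[i:j] = takeWhile isSome, advancing i to j = dropWhile isSome)
def pvRuns : List (Option Int) → List (List Int)
  | [] => []
  | none :: t => pvRuns t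
  | some v :: t =>
      (v :: (t.takeWhile Option.isSome).map (fun o => o.getD 0)) ::
        pvRuns (t.dropWhile Option.isSome)
termination_by seq => seq.length
decreasing_by simp; exact Nat.lt_succ_of_le (List.length_dropWhile_le _ _)

def partition_sequence_alt (seq : List (Option Int)) : List (List Int) × (List (Int × Int)) :=
  let partitions := pvRuns seq
  (partitions, partitions.map (fun b => (b.headD 0, b.getLastD 0)))

-- ===== PRECONDITION & SPEC =====
def Spec_partition_sequence (seq : List (Option Int)) (out : List (List Int) × (List (Int × Int))) : Prop := out = partition_sequence_alt seq
instance (seq : List (Option Int)) (out : List (List Int) × (List (Int × Int))) : Decidable (Spec_partition_sequence seq out) := by unfold Spec_partition_sequence; infer_instance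

-- ===== CLAIM (what is proved, stated in full; the proofs are below) =====
def Claim_equal_partition_sequence : Prop := ∀ (seq : List (Option Int)), Dom_partition_sequence seq → Spec_partition_sequence seq (partition_sequence seq)

-- ===== LEMMAS AND PROOFS =====

-- proof-only reformulation of A's loop result after the final flush
def pvRunsW : List Int → List (Option Int) → List (List Int)
  | block, [] => if block ≠ [] then [block] else []
  | block, none :: t => (if block ≠ [] then [block] else []) ++ pvRunsW [] t
  | block, some v :: t => pvRunsW (block ++ [v]) t

theorem pvALoop_runsW (seq : List (Option Int)) : ∀ (ps : List (List Int)) (block : List Int),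
    (if (pvALoop seq ps block).2 ≠ [] then (pvALoop seq ps block).1 ++ [(pvALoop seq ps block).2]
     else (pvALoop seq ps block).1) = ps ++ pvRunsW block seq := by
  induction seq with
  | nil => intro ps block; simp [pvALoop, pvRunsW]; split <;> simp
  | cons x t ih =>
    intro ps block
    cases x with
    | none =>
      simp only [pvALoop, pvRunsW]
      by_cases hb : block = [] <;> simp [hb, ih]
    | some v => simp [pvALoop, pvRunsW, ih]

theorem pvRunsW_runs (seq : List (Option Int)) : ∀ (block : List Int),
    pvRunsW block seq =
      if block = [] then pvRuns seq
      else (block ++ (seq.takeWhile Option.isSome).map (fun o => o.getD 0)) ::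
             pvRuns (seq.dropWhile Option.isSome) := by
  induction seq with
  | nil => intro block; by_cases hb : block = [] <;> simp [pvRunsW, pvRuns, hb]
  | cons x t ih =>
    intro block
    cases x with
    | none =>
      by_cases hb : block = [] <;>
        simp [pvRunsW, pvRuns, hb, ih, List.takeWhile, List.dropWhile, Option.isSome]
    | some v =>
      by_cases hb : block = [] <;>
        simp [pvRunsW, pvRuns, hb, ih, List.takeWhile, List.dropWhile, Option.isSome]

theorem pvRuns_ne (seq : List (Option Int)) : ∀ b ∈ pvRuns seq, b ≠ [] := by
  induction seq using pvRuns.induct with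
  | case1 => simp [pvRuns]
  | case2 t ih => simpa [pvRuns] using ih
  | case3 v t ih =>
    intro b hb
    simp only [pvRuns, List.mem_cons] at hb
    rcases hb with h | h
    · simp [h]
    · exact ih b h

theorem pvStartEnd_map (ps : List (List Int)) (h : ∀ b ∈ ps, b ≠ []) :
    pvStartEnd ps = ps.map (fun b => (b.headD 0, b.getLastD 0)) := by
  induction ps with
  | nil => simp [pvStartEnd]
  | cons b t ih =>
    have hb : b ≠ [] := h b (by simp)
    obtain ⟨x, xs, rfl⟩ := List.exists_cons_of_ne_nil hb
    have iht := ih (fun b hb => h b (by simp [hb]))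
    simp only [pvStartEnd, List.filterMap_cons, List.map_cons] at iht ⊢
    rw [List.getLast?_eq_some_getLast (l := x :: xs) (by simp)]
    simp only [List.head?_cons]
    rw [iht]
    simp [List.getLastD_eq_getLast?, List.getLast?_eq_some_getLast (l := x :: xs) (by simp)]

-- ===== VERDICT (by name: the statement is the Claim_ definition above) =====
theorem partition_sequence_spec : Claim_equal_partition_sequence := by
  intro seq _
  unfold Spec_partition_sequence partition_sequence partition_sequence_alt
  have h1 := pvALoop_runsW seq [] []
  rw [pvRunsW_runs] at h1
  simp only [List.nil_append, if_true] at h1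
  simp only [h1]
  rw [pvStartEnd_map _ (pvRuns_ne seq)]
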